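-- pv_equiv track=rewrite | github.com/uhlobil/SequentProver | SequentProver/Objects/Sequents.py | _permute_two_parent
-- ===== SOURCE A (Python) =====
-- import itertools
-- from typing import Sequence, Any, Generator
--
-- def _permute_two_parent(propositions: tuple) -> Generator[tuple, Any, None]:
--     """Generates possible combinations for propositions in sides of two
--     parent multiplicative rules."""
--     permutations = [
--         tuple(i) for i in itertools.product([0, 1], repeat=len(propositions))
--     ]
--     for permutation in permutations:
--         x = []
--         y = []
--         for i, value in enumerate(permutation):
--             if value:
--                 y.append(propositions[i])
--             else:
--                 x.append(propositions[i])
--         yield x, y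
-- ===== SOURCE B (Python) =====
-- def _permute_two_parent(propositions):
--     """Generates possible combinations for propositions in sides of two
--     parent multiplicative rules."""
--     def rec(rest, x, y):
--         if not rest:
--             yield x, y
--         else:
--             p = rest[0]
--             yield from rec(rest[1:], x + [p], y)
--             yield from rec(rest[1:], x, y + [p])
--     yield from rec(list(propositions), [], [])
-- ===== Notes on version B (the rewrite author's own statement) =====
-- stated objective: alternative
-- what changed: Replaces the itertools.product bit-vector enumeration plus an index-based splitting loop with a recursive generator that, for each proposition, branches on placing it left or right, yielding partitions directly without materialising the 2^n bit tuples.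
import Mathlib
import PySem

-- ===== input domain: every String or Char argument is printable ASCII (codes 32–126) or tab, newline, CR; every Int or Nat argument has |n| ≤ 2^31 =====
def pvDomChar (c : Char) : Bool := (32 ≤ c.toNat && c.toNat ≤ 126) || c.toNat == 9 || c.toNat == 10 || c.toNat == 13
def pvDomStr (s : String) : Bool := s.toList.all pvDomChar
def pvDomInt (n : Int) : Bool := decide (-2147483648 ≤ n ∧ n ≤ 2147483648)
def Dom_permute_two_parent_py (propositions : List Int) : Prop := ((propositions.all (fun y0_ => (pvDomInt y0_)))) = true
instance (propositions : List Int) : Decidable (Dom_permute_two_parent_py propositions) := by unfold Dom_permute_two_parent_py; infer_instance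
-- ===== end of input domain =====

-- B replaces A's itertools.product bit-vector enumeration + index-splitting loop with a
-- recursive left/right-branching generator (objective: alternative; same output, same order).

-- ===== PORT A =====
-- itertools.product([0,1], repeat=n): leftmost position varies slowest
def pvProduct01 : Nat → List (List Int)
  | 0 => [[]]
  | n + 1 => ([0, 1] : List Int).flatMap (fun b => (pvProduct01 n).map (fun t => b :: t))

-- the inner 'for i, value in enumerate(permutation)' loop; propositions[i] is always
-- in range here (i < len(permutation) = len(propositions)), so pyGetD is exact
def pvSplit (propositions : List Int) (perm : List Int) : List Int × List Int :=
  (PySem.List.enumerate perm 0).foldl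
    (fun (acc : List Int × List Int) iv =>
      if iv.2 ≠ 0 then (acc.1, acc.2 ++ [PySem.List.pyGetD propositions iv.1 0])
      else (acc.1 ++ [PySem.List.pyGetD propositions iv.1 0], acc.2))
    ([], [])

def permute_two_parent_py (propositions : List Int) : List (List Int × List Int) :=
  (pvProduct01 propositions.length).map (fun perm => pvSplit propositions perm)

-- ===== PORT B =====
def pvRec : List Int → List Int → List Int → List (List Int × List Int)
  | [], x, y => [(x, y)]
  | p :: rest, x, y => pvRec rest (x ++ [p]) y ++ pvRec rest x (y ++ [p])

def permute_two_parent_py_alt (propositions : List Int) : List (List Int × List Int) :=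
  pvRec propositions [] []

-- ===== PRECONDITION & SPEC =====
def Spec_permute_two_parent_py (propositions : List Int) (out : List (List Int × List Int)) : Prop := out = permute_two_parent_py_alt propositions
instance (propositions : List Int) (out : List (List Int × List Int)) : Decidable (Spec_permute_two_parent_py propositions out) := by unfold Spec_permute_two_parent_py; infer_instance

-- ===== CLAIM (what is proved, stated in full; the proofs are below) =====
def Claim_equal_permute_two_parent_py : Prop := ∀ (propositions : List Int), Dom_permute_two_parent_py propositions → Spec_permute_two_parent_py propositions (permute_two_parent_py propositions)

-- ===== LEMMAS AND PROOFS =====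

-- pairwise-recursive splitter used to bridge A's index-based fold and B's recursion
def pvZipSplit : List Int → List Int → List Int → List Int → List Int × List Int
  | _, [], x, y => (x, y)
  | [], _ :: _, x, y => (x, y)
  | p :: ps, v :: perm, x, y =>
      if v ≠ 0 then pvZipSplit ps perm x (y ++ [p]) else pvZipSplit ps perm (x ++ [p]) y

lemma pvProduct01_length : ∀ (n : Nat), ∀ perm ∈ pvProduct01 n, perm.length = n := by
  intro n
  induction n with
  | zero => intro perm h; simp [pvProduct01] at h; simp [h]
  | succ n ih =>
      intro perm h
      simp only [pvProduct01, List.flatMap_cons, List.flatMap_nil, List.append_nil,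
        List.mem_append, List.mem_map] at h
      rcases h with ⟨t, ht, rfl⟩ | ⟨t, ht, rfl⟩ <;> simp [ih t ht]

lemma pvGetD_append_length (pre : List Int) (p : Int) (ps : List Int) :
    PySem.List.pyGetD (pre ++ p :: ps) (pre.length : Int) 0 = p := by
  simp [PySem.List.pyGetD]

lemma pvSplit_enum (perm : List Int) : ∀ (pre ps x y : List Int), perm.length = ps.length →
    (PySem.List.enumerate perm (pre.length : Int)).foldl
      (fun (acc : List Int × List Int) iv =>
        if iv.2 ≠ 0 then (acc.1, acc.2 ++ [PySem.List.pyGetD (pre ++ ps) iv.1 0])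
        else (acc.1 ++ [PySem.List.pyGetD (pre ++ ps) iv.1 0], acc.2))
      (x, y) = pvZipSplit ps perm x y := by
  induction perm with
  | nil =>
      intro pre ps x y h
      have hps : ps = [] := by cases ps <;> simp_all
      subst hps
      simp [PySem.List.enumerate_nil, pvZipSplit]
  | cons v perm ih =>
      intro pre ps x y h
      cases ps with
      | nil => simp at h
      | cons p ps =>
          rw [PySem.List.enumerate_cons]
          simp only [List.foldl_cons]
          have hlen : (pre.length : Int) + 1 = ((pre ++ [p]).length : Int) := by
            push_cast; simp
          have hget : PySem.List.pyGetD (pre ++ p :: ps) (pre.length : Int) 0 = p :=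
            pvGetD_append_length pre p ps
          have happ : pre ++ p :: ps = (pre ++ [p]) ++ ps := by simp
          simp only [hget]
          rw [hlen, happ]
          by_cases hv : v ≠ 0
          · rw [if_pos hv, ih (pre ++ [p]) ps x (y ++ [p]) (by simpa using h)]
            simp [pvZipSplit, hv]
          · rw [if_neg hv, ih (pre ++ [p]) ps (x ++ [p]) y (by simpa using h)]
            simp [pvZipSplit, hv]

lemma pvSplit_eq_zip (ps perm : List Int) (h : perm.length = ps.length) :
    pvSplit ps perm = pvZipSplit ps perm [] [] := by
  have := pvSplit_enum perm [] ps [] [] h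
  simpa [pvSplit] using this

lemma pvRec_eq_map : ∀ (ps x y : List Int),
    pvRec ps x y = (pvProduct01 ps.length).map (fun perm => pvZipSplit ps perm x y) := by
  intro ps
  induction ps with
  | nil => intro x y; simp [pvRec, pvProduct01, pvZipSplit]
  | cons p rest ih =>
      intro x y
      simp only [pvRec, List.length_cons, pvProduct01, List.flatMap_cons, List.flatMap_nil,
        List.append_nil, List.map_append, List.map_map]
      rw [ih (x ++ [p]) y, ih x (y ++ [p])]
      congr 1
      all_goals apply List.map_congr_left; intro t _; simp [pvZipSplit]

-- ===== VERDICT (by name: the statement is the Claim_ definition above) =====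
theorem permute_two_parent_py_spec : Claim_equal_permute_two_parent_py := by
  intro ps _
  unfold Spec_permute_two_parent_py permute_two_parent_py permute_two_parent_py_alt
  rw [pvRec_eq_map]
  apply List.map_congr_left
  intro perm hperm
  exact pvSplit_eq_zip ps perm (pvProduct01_length ps.length perm hperm)
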